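-- pv_equiv track=rewrite | github.com/deeptanshu20371/Wealth-Wizardry | Scripts/rag_util.py | build_index_json
-- ===== SOURCE A (Python) =====
-- def build_index_json(data):
--     index = {}
--     for entry in data:
--         key = entry['name'].lower()  # Index by lowercase company name for case-insensitive matching
--         if key not in index:
--             index[key] = []
--         index[key].append(entry)
--     return index
-- ===== SOURCE B (Python) =====
-- def build_index_json(data):
--     keys = dict.fromkeys(e['name'].lower() for e in data)
--     return {k: [e for e in data if e['name'].lower() == k] for k in keys}
-- ===== Notes on version B (the rewrite author's own statement) =====
-- stated objective: simpler
-- what changed: Replaces the mutate-a-bucket-per-entry loop by a declarative two-phase form: dict.fromkeys collects the distinct lowercase names in first-appearance order, then a dict comprehension pairs each key with a filter over the data; no incremental dict mutation remains.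
import Mathlib
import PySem

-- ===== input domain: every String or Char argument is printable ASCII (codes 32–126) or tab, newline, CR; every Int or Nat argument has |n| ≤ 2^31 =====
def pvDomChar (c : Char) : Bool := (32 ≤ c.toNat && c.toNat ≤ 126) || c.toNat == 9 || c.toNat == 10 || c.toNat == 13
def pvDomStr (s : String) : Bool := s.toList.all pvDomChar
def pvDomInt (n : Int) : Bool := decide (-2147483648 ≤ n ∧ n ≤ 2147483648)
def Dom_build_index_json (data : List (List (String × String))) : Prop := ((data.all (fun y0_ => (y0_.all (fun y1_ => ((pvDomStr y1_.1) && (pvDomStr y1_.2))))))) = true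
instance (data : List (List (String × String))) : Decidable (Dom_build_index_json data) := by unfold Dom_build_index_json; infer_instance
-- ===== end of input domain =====

-- B replaces A's incremental bucket-mutating dict loop by a declarative two-phase form
-- (ordered distinct keys via dict.fromkeys, then one filter per key); objective: simpler.

-- entry['name'].lower() — the entry dict is an association list; lookup = first match.
-- (On entries without a "name" key Python raises KeyError; Pre_ excludes those, the
-- getD "" default is never reached inside Pre_.)
def pvKeyOf (e : List (String × String)) : String :=
  PySem.Str.lower (((PySem.Dict.mk e).get? "name").getD "")

-- ===== PORT A =====
def build_index_json (data : List (List (String × String))) : List (String × List (List (String × String))) :=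
  (data.foldl (fun index entry =>
      let key := pvKeyOf entry
      let index := if index.contains key then index else index.insert key []
      index.modify key [] (fun l => l ++ [entry]))
    PySem.Dict.empty).items

-- ===== PORT B =====
def build_index_json_alt (data : List (List (String × String))) : List (String × List (List (String × String))) :=
  let keys := PySem.List.dedup (data.map pvKeyOf)
  keys.map (fun k => (k, data.filter (fun e => pvKeyOf e == k)))

-- ===== PRECONDITION & SPEC =====
-- Pre_ excludes exactly the inputs where an entry has no "name" key: there Python A raises KeyError.
def Pre_build_index_json (data : List (List (String × String))) : Prop :=
  (data.all (fun e => ((PySem.Dict.mk e).get? "name").isSome)) = true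
instance (data : List (List (String × String))) : Decidable (Pre_build_index_json data) := by unfold Pre_build_index_json; infer_instance
def pvWitness_build_index_json : (List (List (String × String))) :=
  [[("name", "Acme"), ("sector", "tech")], [("name", "ACME")], [("name", "Born")]]

def Spec_build_index_json (data : List (List (String × String))) (out : List (String × List (List (String × String)))) : Prop := out = build_index_json_alt data
instance (data : List (List (String × String))) (out : List (String × List (List (String × String)))) : Decidable (Spec_build_index_json data out) := by unfold Spec_build_index_json; infer_instance

-- ===== CLAIM (what is proved, stated in full; the proofs are below) =====
def Claim_equal_build_index_json : Prop := ∀ (data : List (List (String × String))), Dom_build_index_json data → Pre_build_index_json data → Spec_build_index_json data (build_index_json data)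

-- ===== LEMMAS AND PROOFS =====

-- A's loop body (insert-if-missing, then append) is one Python `d[k] = d.get(k, []) + [e]` step.
theorem pvStepA_eq_modify (d : PySem.Dict String (List (List (String × String))))
    (e : List (String × String)) :
    (let key := pvKeyOf e
     let d := if d.contains key then d else d.insert key []
     d.modify key [] (fun l => l ++ [e]))
    = d.modify (pvKeyOf e) [] (fun l => l ++ [e]) := by
  by_cases h : d.contains (pvKeyOf e) = true
  · simp [h]
  · simp only [Bool.not_eq_true] at h
    simp [h, PySem.Dict.modify, PySem.Dict.getD_insert_self,
      PySem.Dict.insert_insert_self, PySem.Dict.getD_of_not_contains d [] h]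

theorem build_index_json_eq_alt (data : List (List (String × String))) :
    build_index_json data = build_index_json_alt data := by
  unfold build_index_json build_index_json_alt
  have hfold : (data.foldl (fun index entry =>
      let key := pvKeyOf entry
      let index := if index.contains key then index else index.insert key []
      index.modify key [] (fun l => l ++ [entry])) PySem.Dict.empty)
      = ((data.map (fun e => (pvKeyOf e, e))).foldl
          (fun d p => d.modify p.1 [] (fun l => l ++ [p.2])) PySem.Dict.empty) := by
    rw [List.foldl_map]
    exact PySem.List.foldl_congr_mem data _ _ _ (fun d e _ => pvStepA_eq_modify d e)
  rw [hfold]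
  set l := data.map (fun e => (pvKeyOf e, e)) with hl
  set D := l.foldl (fun d p => d.modify p.1 [] (fun x => x ++ [p.2])) PySem.Dict.empty with hD
  have hkeys : D.keys = PySem.Set.ofList (data.map pvKeyOf) := by
    rw [hD, PySem.Dict.keys_foldl_modify_key l (fun p => p.1) []
      (fun _ p => (fun x => x ++ [p.2]))]
    simp [hl, PySem.Dict.keys_empty, PySem.Set.update_nil_left, List.map_map, Function.comp_def]
  have hnd : D.keys.Nodup := by rw [hkeys]; exact PySem.Set.nodup_ofList _
  have hget : ∀ c, D.getD c [] = data.filter (fun e => pvKeyOf e == c) := by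
    intro c
    rw [hD, PySem.Dict.getD_foldl_modify_append l PySem.Dict.empty c]
    simp only [PySem.Dict.getD_empty, List.nil_append, hl, List.filter_map]
    simp [Function.comp_def]
  rw [PySem.Dict.items_eq_map_keys D hnd [], hkeys, PySem.List.dedup_eq_ofList]
  exact List.map_congr_left (fun k _ => by rw [hget k])

-- ===== VERDICT (by name: the statement is the Claim_ definition above) =====
theorem build_index_json_spec : Claim_equal_build_index_json := by
  intro data _ _
  unfold Spec_build_index_json
  exact build_index_json_eq_alt data
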